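-- pv_equiv track=rewrite | github.com/DaveWei512/MystanCodeProJects | SeriesOfAnagram/recursion.py | helper
-- ===== SOURCE A (Python) =====
-- def helper(s, ans, lst, x):
--     if len(ans) == x:
--         lst.append(ans)
--     else:
--         for ch in s:
--             if s.count(ch) == ans.count(ch):
--                 pass
--             else:
--                 ans += ch
--                 helper(s, ans, lst, x)
--                 ans = ans[:-1]
--     return lst
-- ===== SOURCE B (Python) =====
-- def helper(s, ans, lst, x):
--     # Iterative DFS with an explicit stack instead of A's backtracking recursion
--     # that mutates ans; same append order, appends to the caller's lst in place.
--     stack = [ans]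
--     while stack:
--         p = stack.pop()
--         if len(p) == x:
--             lst.append(p)
--         else:
--             for ch in reversed(s):
--                 if s.count(ch) != p.count(ch):
--                     stack.append(p + ch)
--     return lst
-- ===== Notes on version B (the rewrite author's own statement) =====
-- stated objective: alternative
-- what changed: A is a backtracking recursion that mutates the shared prefix (ans += ch ... ans = ans[:-1]) and threads the output list through the recursive calls; B is an iterative depth-first search with an explicit stack of pending prefixes, popping a prefix per loop iteration and pushing its children in reversed(s) order so the LIFO order reproduces A's left-to-right pre-order exactly.
-- outside the precondition, e.g. on helper('a', 'aa', [], 3): A returns ['aaa'], B returns ['aaa']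
import Mathlib
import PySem

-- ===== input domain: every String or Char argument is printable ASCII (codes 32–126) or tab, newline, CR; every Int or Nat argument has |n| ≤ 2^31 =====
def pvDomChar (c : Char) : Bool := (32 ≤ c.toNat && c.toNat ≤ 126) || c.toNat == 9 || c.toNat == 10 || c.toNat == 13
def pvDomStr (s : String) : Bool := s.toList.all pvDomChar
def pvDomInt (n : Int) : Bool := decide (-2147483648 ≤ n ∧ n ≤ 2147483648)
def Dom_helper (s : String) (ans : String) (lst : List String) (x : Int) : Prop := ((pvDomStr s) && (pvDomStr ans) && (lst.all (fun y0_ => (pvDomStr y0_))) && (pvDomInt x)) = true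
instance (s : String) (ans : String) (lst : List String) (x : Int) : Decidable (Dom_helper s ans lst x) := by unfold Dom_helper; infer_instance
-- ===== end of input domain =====

-- B replaces A's backtracking recursion (which mutates the shared prefix ans and threads
-- the output list through the calls) by an iterative depth-first search with an explicit
-- stack (objective: alternative decomposition, not faster).
-- Like A, the Python B appends the results to the caller's lst in place; the equivalence
-- proved here is about the return value.

-- ===== PORT A =====
-- A's recursion over strings, on List Char (s.count(ch) for the 1-char ch equals List.count).
-- Python's recursion is unbounded; whenever it returns, its depth is at most
-- s.length + max(0, x - ans.length) + 1 (a path can grow towards length x and then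
-- strictly decreases the remaining multiplicity deficit), so this fuel is a pure
-- totality device, never exhausted on a run that returns.
def helperCore : Nat → List Char → List Char → List (List Char) → Int → List (List Char)
  | 0, _, _, lst, _ => lst
  | fuel+1, s, ans, lst, x =>
    if (ans.length : Int) = x then lst ++ [ans]
    else s.foldl (fun acc ch =>
      if s.count ch = ans.count ch then acc
      else helperCore fuel s (ans ++ [ch]) acc x) lst

def helper (s : String) (ans : String) (lst : List String) (x : Int) : List String :=
  (helperCore (s.toList.length + 1 + (x - ans.toList.length).toNat)
      s.toList ans.toList (lst.map String.toList) x).map String.ofList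

-- ===== PORT B =====
-- Source B's while-loop over an explicit stack. The Python stack (top = last element,
-- pop from the end, children pushed in reversed(s) order) is represented top-first:
-- pop = take the head, and pushing the children of p in reversed(s) order one by one
-- is prepending them in s order, i.e. childrenOf s p ++ rest.
def childrenOf (s p : List Char) : List (List Char) :=
  (s.filter (fun ch => s.count ch ≠ p.count ch)).map (fun ch => p ++ [ch])

-- Source B's while-loop runs one iteration per popped node; inside Pre_helper the search
-- tree has at most (s.length+1)^(s.length+1) nodes (depth ≤ s.length, branching ≤
-- s.length), so this fuel is a pure totality device, never exhausted on admitted inputs.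
def stackCore : Nat → List Char → Int → List (List Char) → List (List Char) → List (List Char)
  | 0, _, _, _, lst => lst
  | _+1, _, _, [], lst => lst
  | fuel+1, s, x, p :: rest, lst =>
    if (p.length : Int) = x then stackCore fuel s x rest (lst ++ [p])
    else stackCore fuel s x (childrenOf s p ++ rest) lst

def helper_alt (s : String) (ans : String) (lst : List String) (x : Int) : List String :=
  (stackCore ((s.toList.length + 1) ^ (s.toList.length + 1)) s.toList x
      [ans.toList] (lst.map String.toList)).map String.ofList

-- ===== PRECONDITION & SPEC =====
-- Pre_ excludes inputs where ans already holds more copies of some character of s than s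
-- itself: there the count-skip test never blocks that character, the recursion depth grows
-- to x - len(ans), and A raises RecursionError for large x; for small x A still returns the
-- same value B does, but the single closed-form condition cannot separate those from the
-- crashing runs.
def Pre_helper (s : String) (ans : String) (_lst : List String) (_x : Int) : Prop :=
  (s.toList.all (fun c => ans.toList.count c ≤ s.toList.count c)) = true
instance (s : String) (ans : String) (lst : List String) (x : Int) : Decidable (Pre_helper s ans lst x) := by unfold Pre_helper; infer_instance

def pvWitness_helper : String × String × List String × Int := ("aab", "a", ["q"], 2)

def Spec_helper (s : String) (ans : String) (lst : List String) (x : Int) (out : List String) : Prop := out = helper_alt s ans lst x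
instance (s : String) (ans : String) (lst : List String) (x : Int) (out : List String) : Decidable (Spec_helper s ans lst x out) := by unfold Spec_helper; infer_instance

-- ===== CLAIM (what is proved, stated in full; the proofs are below) =====
def Claim_equal_helper : Prop := ∀ (s : String) (ans : String) (lst : List String) (x : Int), Dom_helper s ans lst x → Pre_helper s ans lst x → Spec_helper s ans lst x (helper s ans lst x)

-- ===== LEMMAS AND PROOFS =====

-- The multiplicity invariant maintained along any path of the search.
def InvSP (s p : List Char) : Prop := ∀ c ∈ s, p.count c ≤ s.count c

-- How many more characters can still be appended before every character of s is used up.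
def deficit (s p : List Char) : Nat := (s.dedup.map (fun c => s.count c - p.count c)).sum

-- The pure value of the search from prefix p (fuel = depth budget).
def res : Nat → List Char → List Char → Int → List (List Char)
  | 0, _, _, _ => []
  | fuel+1, s, p, x =>
    if (p.length : Int) = x then [p]
    else (s.filter (fun ch => s.count ch ≠ p.count ch)).flatMap
      (fun ch => res fuel s (p ++ [ch]) x)

def Res (s p : List Char) (x : Int) : List (List Char) := res (deficit s p + 1) s p x

def nodeBound (s p : List Char) : Nat := (s.length + 1) ^ (deficit s p + 1)

theorem flatMap_if_filter (s : List Char) (P : Char → Prop) [DecidablePred P]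
    (f : Char → List (List Char)) :
    (s.flatMap fun ch => if P ch then [] else f ch)
      = (s.filter (fun ch => ¬ P ch)).flatMap f := by
  induction s with
  | nil => rfl
  | cons a t ih =>
    by_cases h : P a <;> simp [List.flatMap_cons, h, ih]

-- A's accumulator recursion computes lst ++ the pure search value, at every fuel.
theorem helperCore_eq_res (fuel : Nat) :
    ∀ (s ans : List Char) (lst : List (List Char)) (x : Int),
      helperCore fuel s ans lst x = lst ++ res fuel s ans x := by
  induction fuel with
  | zero => intro s ans lst x; simp [helperCore, res]
  | succ fuel ih =>
    intro s ans lst x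
    by_cases hx : (ans.length : Int) = x
    · simp [helperCore, res, hx]
    · simp only [helperCore, res, if_neg hx]
      have hA : s.foldl (fun acc ch =>
            if s.count ch = ans.count ch then acc
            else helperCore fuel s (ans ++ [ch]) acc x) lst
          = lst ++ s.flatMap (fun ch =>
            if s.count ch = ans.count ch then []
            else res fuel s (ans ++ [ch]) x) := by
        rw [← PySem.List.foldl_append_eq_flatMap]
        congr 1
        funext acc ch
        by_cases h : s.count ch = ans.count ch
        · simp [h]
        · simp [h, ih]
      rw [hA, flatMap_if_filter]

theorem count_append_singleton (p : List Char) (ch c : Char) :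
    (p ++ [ch]).count c = p.count c + if c = ch then 1 else 0 := by
  by_cases h : c = ch
  · simp [List.count_append, h]
  · simp [List.count_append, List.count_cons, List.count_nil, h]
    exact fun e => h e.symm

theorem sum_sub_append (s p : List Char) (ch : Char) :
    ∀ (l : List Char), l.Nodup → ch ∈ l → p.count ch < s.count ch →
      (l.map (fun c => s.count c - (p ++ [ch]).count c)).sum + 1
        = (l.map (fun c => s.count c - p.count c)).sum := by
  intro l
  induction l with
  | nil => intro _ h; exact absurd h (List.not_mem_nil)
  | cons a t ih =>
    intro hnd hmem hlt
    rcases List.mem_cons.1 hmem with heq | hmem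
    · subst heq
      have hnin : ch ∉ t := (List.nodup_cons.1 hnd).1
      have ht : ∀ c ∈ t, (p ++ [ch]).count c = p.count c := by
        intro c hc
        have hne : c ≠ ch := fun h => hnin (h ▸ hc)
        rw [count_append_singleton, if_neg hne, Nat.add_zero]
      have hmap : t.map (fun c => s.count c - (p ++ [ch]).count c)
          = t.map (fun c => s.count c - p.count c) :=
        List.map_congr_left (fun c hc => by rw [ht c hc])
      simp only [List.map_cons, List.sum_cons]
      rw [hmap, count_append_singleton, if_pos rfl]
      omega
    · by_cases ha : a = ch
      · subst ha
        have hnin : a ∉ t := (List.nodup_cons.1 hnd).1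
        exact absurd hmem hnin
      · have hhead : (p ++ [ch]).count a = p.count a := by
          rw [count_append_singleton, if_neg ha, Nat.add_zero]
        have := ih (List.nodup_cons.1 hnd).2 hmem hlt
        simp only [List.map_cons, List.sum_cons, hhead]
        omega

theorem deficit_child (s p : List Char) (ch : Char) (hch : ch ∈ s)
    (hlt : p.count ch < s.count ch) :
    deficit s (p ++ [ch]) + 1 = deficit s p := by
  unfold deficit
  exact sum_sub_append s p ch s.dedup s.nodup_dedup (List.mem_dedup.2 hch) hlt

theorem inv_child (s p : List Char) (ch : Char) (h : InvSP s p)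
    (hlt : p.count ch < s.count ch) : InvSP s (p ++ [ch]) := by
  intro c hc
  rcases eq_or_ne c ch with rfl | hne
  · rw [count_append_singleton]; simp; omega
  · rw [count_append_singleton]; simp [hne]; exact h c hc

theorem filter_lt (s p : List Char) (h : InvSP s p) (ch : Char)
    (hch : ch ∈ s.filter (fun ch => s.count ch ≠ p.count ch)) :
    ch ∈ s ∧ p.count ch < s.count ch := by
  have hm := List.mem_of_mem_filter hch
  have hne := List.of_mem_filter hch
  simp only [decide_eq_true_eq] at hne
  exact ⟨hm, lt_of_le_of_ne (h ch hm) fun e => hne e.symm⟩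

-- The pure search value does not depend on the fuel, as long as it exceeds the deficit.
theorem res_stable : ∀ (n m : Nat) (s p : List Char) (x : Int), InvSP s p →
    deficit s p < n → deficit s p < m → res n s p x = res m s p x := by
  intro n
  induction n with
  | zero => intro m s p x _ h; omega
  | succ n ih =>
    intro m s p x hinv hn hm
    match m, hm with
    | m+1, hm =>
      by_cases hx : (p.length : Int) = x
      · simp [res, hx]
      · simp only [res, if_neg hx]
        rw [List.flatMap_def, List.flatMap_def]
        congr 1
        apply List.map_congr_left
        intro ch hch
        obtain ⟨hchs, hlt⟩ := filter_lt s p hinv ch hch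
        have hd := deficit_child s p ch hchs hlt
        have h1 : deficit s (p ++ [ch]) < n := by omega
        have h2 : deficit s (p ++ [ch]) < m := by omega
        exact ih m s (p ++ [ch]) x (inv_child s p ch hinv hlt) h1 h2

theorem Res_leaf (s p : List Char) (x : Int) (hx : (p.length : Int) = x) :
    Res s p x = [p] := by simp [Res, res, hx]

theorem Res_node (s p : List Char) (x : Int) (hinv : InvSP s p)
    (hx : ¬ (p.length : Int) = x) :
    Res s p x = (childrenOf s p).flatMap (fun q => Res s q x) := by
  unfold Res childrenOf
  simp only [res, if_neg hx]
  rw [List.flatMap_map]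
  rw [List.flatMap_def, List.flatMap_def]
  congr 1
  apply List.map_congr_left
  intro ch hch
  obtain ⟨hchs, hlt⟩ := filter_lt s p hinv ch hch
  have hd := deficit_child s p ch hchs hlt
  exact res_stable (deficit s p) (deficit s (p ++ [ch]) + 1) s (p ++ [ch]) x
    (inv_child s p ch hinv hlt) (by omega) (by omega)

theorem nodeBound_pos (s p : List Char) : 1 ≤ nodeBound s p :=
  Nat.one_le_pow _ _ (Nat.succ_pos _)

theorem children_bound (s p : List Char) (hinv : InvSP s p) :
    ((childrenOf s p).map (nodeBound s)).sum + 1 ≤ nodeBound s p := by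
  have hconst : ∀ b ∈ (childrenOf s p).map (nodeBound s),
      b ≤ (s.length + 1) ^ (deficit s p) := by
    intro b hb
    obtain ⟨q, hq, rfl⟩ := List.mem_map.1 hb
    obtain ⟨ch, hch, rfl⟩ := List.mem_map.1 hq
    obtain ⟨hchs, hlt⟩ := filter_lt s p hinv ch hch
    have hd := deficit_child s p ch hchs hlt
    unfold nodeBound
    rw [show deficit s (p ++ [ch]) + 1 = deficit s p from hd]
  have hlen : ((childrenOf s p).map (nodeBound s)).length ≤ s.length := by
    simp only [List.length_map, childrenOf]
    exact List.length_filter_le _ _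
  have hsum := List.sum_le_card_nsmul ((childrenOf s p).map (nodeBound s)) _ hconst
  have hpow : 1 ≤ (s.length + 1) ^ (deficit s p) := Nat.one_le_pow _ _ (Nat.succ_pos _)
  unfold nodeBound
  rw [pow_succ]
  simp only [smul_eq_mul] at hsum
  calc ((childrenOf s p).map (nodeBound s)).sum + 1
      ≤ ((childrenOf s p).map (nodeBound s)).length * (s.length + 1) ^ deficit s p + 1 := by omega
    _ ≤ s.length * (s.length + 1) ^ deficit s p + (s.length + 1) ^ deficit s p := by
        have := Nat.mul_le_mul_right ((s.length + 1) ^ deficit s p) hlen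
        omega
    _ = (s.length + 1) ^ deficit s p * (s.length + 1) := by ring

-- The stack loop, given enough fuel, emits the pure search value of every stack entry
-- in order.
theorem stack_ok (s : List Char) (x : Int) : ∀ (fuel : Nat) (stack lst : List (List Char)),
    (∀ p ∈ stack, InvSP s p) →
    (stack.map (nodeBound s)).sum ≤ fuel →
    stackCore fuel s x stack lst = lst ++ stack.flatMap (fun p => Res s p x) := by
  intro fuel
  induction fuel with
  | zero =>
    intro stack lst hinv hsum
    match stack with
    | [] => simp [stackCore]
    | p :: rest =>
      exfalso
      have := nodeBound_pos s p
      simp only [List.map_cons, List.sum_cons] at hsum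
      omega
  | succ fuel ih =>
    intro stack lst hinv hsum
    match stack with
    | [] => simp [stackCore]
    | p :: rest =>
      simp only [List.map_cons, List.sum_cons] at hsum
      have hnb := nodeBound_pos s p
      have hip : InvSP s p := hinv p (List.mem_cons_self ..)
      by_cases hx : (p.length : Int) = x
      · simp only [stackCore, if_pos hx]
        rw [ih rest (lst ++ [p]) (fun q hq => hinv q (List.mem_cons_of_mem _ hq)) (by omega)]
        simp [Res_leaf s p x hx]
      · simp only [stackCore, if_neg hx]
        have hchInv : ∀ q ∈ childrenOf s p, InvSP s q := by
          intro q hq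
          obtain ⟨ch, hch, rfl⟩ := List.mem_map.1 hq
          obtain ⟨hchs, hlt⟩ := filter_lt s p hip ch hch
          exact inv_child s p ch hip hlt
        have hcb := children_bound s p hip
        rw [ih (childrenOf s p ++ rest) lst
            (fun q hq => (List.mem_append.1 hq).elim (hchInv q) (fun h => hinv q (List.mem_cons_of_mem _ h)))
            (by rw [List.map_append, List.sum_append]; omega)]
        rw [List.flatMap_cons, List.flatMap_append, Res_node s p x hip hx]

theorem deficit_le (s p : List Char) : deficit s p ≤ s.length := by
  have h1 : (s.dedup.map (fun c => s.count c - p.count c)).sum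
      ≤ (s.dedup.map (fun c => s.count c)).sum := by
    apply List.sum_le_sum
    intro c _; omega
  have h2 := List.sum_map_count_dedup_eq_length s
  unfold deficit
  omega

-- ===== VERDICT (by name: the statement is the Claim_ definition above) =====
theorem helper_spec : Claim_equal_helper := by
  intro s ans lst x _ hpre
  unfold Spec_helper helper helper_alt
  have hinv : InvSP s.toList ans.toList := by
    intro c hc
    have := List.all_eq_true.1 hpre c hc
    simpa using this
  have hd := deficit_le s.toList ans.toList
  rw [helperCore_eq_res]
  rw [stack_ok s.toList x _ [ans.toList] (lst.map String.toList)
      (by intro p hp; simp at hp; subst hp; exact hinv)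
      (by
        simp only [List.map_cons, List.map_nil, List.sum_cons, List.sum_nil, Nat.add_zero]
        unfold nodeBound
        exact Nat.pow_le_pow_right (Nat.succ_pos _) (by omega))]
  rw [res_stable (s.toList.length + 1 + (x - ans.toList.length).toNat)
      (deficit s.toList ans.toList + 1)
      s.toList ans.toList x hinv (by omega) (by omega)]
  simp [Res]
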